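-- pv_equiv track=rewrite | github.com/Ezhan-Khan/Python-Practice- | Python_Refresher_Notes.py | odd_indices
-- ===== SOURCE A (Python) =====
-- def odd_indices(lst):
--     new_lst = [ ]
--     for index in range(len(lst)):
--         if index % 2 != 0:
--             new_lst.append(index)
--         else:
--             new_lst = new_lst
--     return new_lst
-- ===== SOURCE B (Python) =====
-- def odd_indices(lst):
--     return list(range(1, len(lst), 2))
-- ===== Notes on version B (the rewrite author's own statement) =====
-- stated objective: idiomatic
-- what changed: B produces the odd indices directly with a stride-2 range over [1, len(lst)) instead of scanning every index and testing parity with an accumulator loop.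
import Mathlib
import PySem

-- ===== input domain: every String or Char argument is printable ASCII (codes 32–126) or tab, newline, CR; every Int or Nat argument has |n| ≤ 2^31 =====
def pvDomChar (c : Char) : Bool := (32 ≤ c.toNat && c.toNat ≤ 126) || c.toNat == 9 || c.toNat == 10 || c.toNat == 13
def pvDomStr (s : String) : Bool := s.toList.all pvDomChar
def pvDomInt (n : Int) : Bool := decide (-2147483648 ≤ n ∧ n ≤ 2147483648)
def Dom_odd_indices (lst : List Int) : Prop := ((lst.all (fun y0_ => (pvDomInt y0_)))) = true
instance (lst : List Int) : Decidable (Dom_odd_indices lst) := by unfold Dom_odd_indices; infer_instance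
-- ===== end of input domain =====

-- B replaces A's scan over every index with parity test by a direct stride-2 range (idiomatic).

-- ===== PORT A =====
def odd_indices (lst : List Int) : List Int :=
  (PySem.List.pyRange 0 (PySem.List.len lst) 1).foldl
    (fun new_lst index =>
      if PySem.Int.mod index 2 ≠ 0 then new_lst ++ [index] else new_lst) []

-- ===== PORT B =====
def odd_indices_alt (lst : List Int) : List Int :=
  PySem.List.pyRange 1 (PySem.List.len lst) 2

-- ===== PRECONDITION & SPEC =====
def Spec_odd_indices (lst : List Int) (out : List Int) : Prop := out = odd_indices_alt lst
instance (lst : List Int) (out : List Int) : Decidable (Spec_odd_indices lst out) := by unfold Spec_odd_indices; infer_instance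

-- ===== CLAIM (what is proved, stated in full; the proofs are below) =====
def Claim_equal_odd_indices : Prop := ∀ (lst : List Int), Dom_odd_indices lst → Spec_odd_indices lst (odd_indices lst)

-- ===== LEMMAS AND PROOFS =====

theorem pvFoldA (l : List Int) (acc : List Int) :
    l.foldl (fun new_lst index =>
      if PySem.Int.mod index 2 ≠ 0 then new_lst ++ [index] else new_lst) acc
    = acc ++ l.filter (fun i => decide (PySem.Int.mod i 2 ≠ 0)) := by
  induction l generalizing acc with
  | nil => simp
  | cons x xs ih =>
    rw [List.foldl_cons, List.filter_cons]
    by_cases h : PySem.Int.mod x 2 ≠ 0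
    · rw [if_pos h, if_pos (decide_eq_true h), ih]
      simp
    · rw [if_neg h, if_neg (by simpa using h), ih]

theorem pvRng2 (m : Nat) :
    PySem.List.pyRange 1 (m : Int) 2 = List.map (fun k : Nat => (1 : Int) + 2 * (k : Int)) (List.range (m / 2)) := by
  rw [PySem.List.pyRange_of_pos _ _ (by norm_num : (0:ℤ) < 2)]
  have hcount : (if (1:ℤ) < (m:ℤ) then (((m:ℤ) - 1 + 2 - 1) / 2).toNat else 0) = m / 2 := by
    split_ifs <;> omega
  rw [hcount]

theorem pvStep (m : Nat) :
    PySem.List.pyRange 1 ((m : Int) + 1) 2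
      = PySem.List.pyRange 1 (m : Int) 2
        ++ (if PySem.Int.mod (m : Int) 2 ≠ 0 then [(m : Int)] else []) := by
  have h1 : ((m : Int) + 1) = ((m + 1 : Nat) : Int) := by push_cast; ring
  rw [h1, pvRng2, pvRng2]
  rcases Nat.even_or_odd m with he | ho
  · have h2 : (2 : Int) ∣ (m : Int) := by
      obtain ⟨k, hk⟩ := he; exact ⟨k, by push_cast [hk]; ring⟩
    have hm : PySem.Int.mod (m : Int) 2 = 0 :=
      (PySem.Int.mod_eq_zero_iff_dvd (m : Int) 2).mpr h2
    have hdiv : (m + 1) / 2 = m / 2 := by omega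
    rw [if_neg (not_not_intro hm), hdiv, List.append_nil]
  · obtain ⟨j, hj⟩ := ho
    have h2 : ¬ (2 : Int) ∣ (m : Int) := by rintro ⟨k, hk⟩; omega
    have hm : PySem.Int.mod (m : Int) 2 ≠ 0 := fun h0 =>
      h2 ((PySem.Int.mod_eq_zero_iff_dvd (m : Int) 2).mp h0)
    have hdiv : (m + 1) / 2 = m / 2 + 1 := by omega
    rw [if_pos hm, hdiv, List.range_succ, List.map_append]
    congr 1
    simp only [List.map_cons, List.map_nil]
    congr 1
    omega

theorem pvKey (m : Nat) :
    (PySem.List.pyRange 0 (m : Int) 1).filter (fun i => decide (PySem.Int.mod i 2 ≠ 0))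
      = PySem.List.pyRange 1 (m : Int) 2 := by
  induction m with
  | zero => decide
  | succ m ih =>
    have hc : ((m + 1 : Nat) : Int) = (m : Int) + 1 := by push_cast; ring
    rw [hc, PySem.List.pyRange_one_succ_right (by positivity), List.filter_append, ih, pvStep]
    congr 1
    simp only [List.filter_cons, List.filter_nil, decide_eq_true_eq]

-- ===== VERDICT (by name: the statement is the Claim_ definition above) =====
theorem odd_indices_spec : Claim_equal_odd_indices := by
  intro lst _
  unfold Spec_odd_indices odd_indices odd_indices_alt
  rw [pvFoldA, List.nil_append, PySem.List.len_eq, pvKey]
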